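-- pv_equiv track=rewrite | github.com/ApriF/Advent_of_Code | day7/script.py | operators_part1
-- ===== SOURCE A (Python) =====
-- def operators_part1(indice, n):
--     if n==2:
--         if indice == 0:
--             return '+'
--         if indice ==1:
--             return '*'
--     if indice < n//2:
--         return '+' + operators_part1(indice, n//2)
--     else:
--         return '*' + operators_part1(indice-n//2, n//2)
-- ===== SOURCE B (Python) =====
-- def operators_part1(indice, n):
--     res = ''
--     while n > 2:
--         half = n // 2
--         if indice < half:
--             res += '+'
--         else:
--             res += '*'
--             indice -= half
--         n = half
--     if n == 2 and indice == 0: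
--         return res + '+'
--     if n == 2 and indice == 1:
--         return res + '*'
--     raise ValueError('indice is not a valid operator index for n')
-- ===== Notes on version B (the rewrite author's own statement) =====
-- stated objective: simpler
-- what changed: Replaces the recursion (which concatenates onto recursive calls) with a single iterative while-loop over a string accumulator, appending the base-case character after the loop; on invalid inputs (outside Pre_), where A's recursion never reaches its base case and raises RecursionError, B raises ValueError.
import Mathlib
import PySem

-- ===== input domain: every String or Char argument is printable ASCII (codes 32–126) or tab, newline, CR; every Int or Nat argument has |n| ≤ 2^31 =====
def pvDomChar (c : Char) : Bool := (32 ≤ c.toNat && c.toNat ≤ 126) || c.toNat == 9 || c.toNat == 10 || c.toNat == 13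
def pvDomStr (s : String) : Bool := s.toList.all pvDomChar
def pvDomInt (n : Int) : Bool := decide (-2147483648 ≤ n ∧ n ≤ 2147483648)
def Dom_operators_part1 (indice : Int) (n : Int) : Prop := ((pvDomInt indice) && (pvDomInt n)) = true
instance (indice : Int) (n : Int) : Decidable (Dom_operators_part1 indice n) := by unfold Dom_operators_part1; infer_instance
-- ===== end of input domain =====

-- B replaces A's recursion by a single iterative loop with an accumulator (objective: simpler);
-- on invalid inputs (outside Pre_), where A's recursion never returns, B raises ValueError.

-- ===== PORT A =====
-- A is recursive and only terminates on the intended inputs; the fuel (64, ample for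
-- |n| ≤ 2^31, whose halving chain has ≤ 31 steps) only makes the same computation total —
-- inputs exhausting it raise RecursionError in Python and are excluded by Pre_.
def opAGo : Nat → Int → Int → String
  | 0, _, _ => ""
  | fuel + 1, indice, n =>
    if n = 2 ∧ indice = 0 then "+"
    else if n = 2 ∧ indice = 1 then "*"
    else if indice < PySem.Int.floordiv n 2 then
      "+" ++ opAGo fuel indice (PySem.Int.floordiv n 2)
    else
      "*" ++ opAGo fuel (indice - PySem.Int.floordiv n 2) (PySem.Int.floordiv n 2)

def operators_part1 (indice : Int) (n : Int) : String := opAGo 64 indice n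

-- ===== PORT B =====
-- the while loop of Source B: res accumulates one char per iteration, then the final checks;
-- Source B's 'raise ValueError' (reached only outside Pre_) is ported as returning res as-is
def altGo (indice : Int) (n : Int) (res : List Char) : List Char :=
  if _h : 2 < n then
    if indice < PySem.Int.floordiv n 2 then
      altGo indice (PySem.Int.floordiv n 2) (res ++ ['+'])
    else
      altGo (indice - PySem.Int.floordiv n 2) (PySem.Int.floordiv n 2) (res ++ ['*'])
  else if n = 2 ∧ indice = 0 then res ++ ['+']
  else if n = 2 ∧ indice = 1 then res ++ ['*']
  else res
termination_by n.toNat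
decreasing_by
  all_goals
    have := PySem.Int.floordiv_eq_ediv_of_pos (a := n) (b := 2) (by omega)
    omega

def operators_part1_alt (indice : Int) (n : Int) : String :=
  String.ofList (altGo indice n [])

-- ===== PRECONDITION & SPEC =====
-- the halving thresholds n//2, n//4, …, n//2^(j+1) that A's recursion compares against
def chain (n : Int) (j : Nat) : List Int := (List.range (j + 1)).map fun l => n / 2 ^ (l + 1)

-- membership in the set of subset sums of a super-increasing list (greedy test)
def canRep : List Int → Int → Bool
  | [], i => i == 0
  | t :: ts, i => canRep ts (if t ≤ i then i - t else i)

-- Pre_ is exactly the set of inputs on which the Python A returns (everywhere else its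
-- recursion never reaches the base case and raises RecursionError): repeated halving of n
-- must hit exactly 2 — i.e. n ≥ 2 and n < 3·2^(⌊log2 n⌋ - 1) — and indice must be a
-- subset sum of the halving thresholds of n (greedy test canRep, valid as the chain is
-- super-increasing).
def Pre_operators_part1 (indice : Int) (n : Int) : Prop :=
  2 ≤ n ∧ 0 ≤ indice ∧ n < 3 * 2 ^ (n.toNat.log2 - 1) ∧
    canRep (chain n (n.toNat.log2 - 1)) indice = true
instance (indice : Int) (n : Int) : Decidable (Pre_operators_part1 indice n) := by
  unfold Pre_operators_part1; infer_instance
def pvWitness_operators_part1 : Int × Int := (5, 8)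

def Spec_operators_part1 (indice : Int) (n : Int) (out : String) : Prop :=
  out = operators_part1_alt indice n
instance (indice : Int) (n : Int) (out : String) : Decidable (Spec_operators_part1 indice n out) := by
  unfold Spec_operators_part1; infer_instance

-- ===== CLAIM (what is proved, stated in full; the proofs are below) =====
def Claim_equal_operators_part1 : Prop := ∀ (indice : Int) (n : Int), Dom_operators_part1 indice n → Pre_operators_part1 indice n → Spec_operators_part1 indice n (operators_part1 indice n)

-- ===== LEMMAS AND PROOFS =====

lemma fd2 (a : Int) : PySem.Int.floordiv a 2 = a / 2 :=
  PySem.Int.floordiv_eq_ediv_of_pos (by omega)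

lemma strCons (c : Char) (l : List Char) :
    String.ofList [c] ++ String.ofList l = String.ofList (c :: l) := by
  apply String.toList_injective
  simp [String.toList_append]

lemma altGo_append (m : Nat) (i n : Int) (hm : n.toNat = m) (res : List Char) :
    altGo i n res = res ++ altGo i n [] := by
  induction m using Nat.strong_induction_on generalizing i n res with
  | _ m ih =>
    rw [altGo]
    conv_rhs => rw [altGo]
    by_cases h2 : 2 < n
    · have hlt : (PySem.Int.floordiv n 2).toNat < m := by
        rw [fd2] at *; omega
      simp only [h2, dif_pos]
      by_cases hi : i < PySem.Int.floordiv n 2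
      · rw [if_pos hi, if_pos hi,
            ih _ hlt _ _ rfl (res ++ ['+']), ih _ hlt _ _ rfl ([] ++ ['+'])]
        simp
      · rw [if_neg hi, if_neg hi,
            ih _ hlt _ _ rfl (res ++ ['*']), ih _ hlt _ _ rfl ([] ++ ['*'])]
        simp
    · simp only [h2, dif_neg, not_false_iff]
      split_ifs <;> simp

lemma chain_succ (n : Int) (j : Nat) :
    chain n (j + 1) = n / 2 :: chain (n / 2) j := by
  unfold chain
  rw [List.range_succ_eq_map]
  simp only [List.map_cons, List.map_map]
  refine congrArg _ (List.map_congr_left fun l _ => ?_)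
  simp only [Function.comp_apply]
  rw [show (2:Int) ^ (l + 1 + 1) = 2 * 2 ^ (l + 1) by ring, ← Int.ediv_ediv_of_nonneg (by omega : (0:Int) ≤ 2)]

lemma main_eq (j : Nat) : ∀ (fuel : Nat) (n i : Int), j + 1 ≤ fuel →
    2 ^ (j + 1) ≤ n → n < 3 * 2 ^ j → 0 ≤ i → canRep (chain n j) i = true →
    opAGo fuel i n = String.ofList (altGo i n []) := by
  induction j with
  | zero =>
    intro fuel n i hf hlo hhi h0 hrep
    obtain ⟨fuel, rfl⟩ : ∃ f, fuel = f + 1 := ⟨fuel - 1, by omega⟩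
    have hn : n = 2 := by omega
    subst hn
    have : chain 2 0 = [1] := by decide
    rw [this] at hrep
    simp only [canRep, beq_iff_eq] at hrep
    have : i = 0 ∨ i = 1 := by split at hrep <;> omega
    rcases this with rfl | rfl
    · rw [altGo]; simp [opAGo]
    · rw [altGo]; simp [opAGo]
  | succ j ih =>
    intro fuel n i hf hlo hhi h0 hrep
    obtain ⟨fuel, rfl⟩ : ∃ f, fuel = f + 1 := ⟨fuel - 1, by omega⟩
    have hp1 : (2:Int) ^ (j + 1) = 2 * 2 ^ j := by ring
    have hp2 : (2:Int) ^ (j + 1 + 1) = 2 * 2 ^ (j + 1) := by ring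
    have hj0 : (0:Int) < 2 ^ j := by positivity
    have hne : n ≠ 2 := by omega
    have hhalf_lo : 2 ^ (j + 1) ≤ n / 2 := by omega
    have hhalf_hi : n / 2 < 3 * 2 ^ j := by omega
    rw [chain_succ] at hrep
    simp only [canRep] at hrep
    rw [opAGo, altGo]
    simp only [hne, false_and, if_false, fd2, dif_pos (show 2 < n by omega),
      List.nil_append]
    by_cases hi : i < n / 2
    · rw [if_pos hi, if_pos hi,
          altGo_append (n / 2).toNat i (n / 2) rfl ['+'],
          ih fuel (n / 2) i (by omega) hhalf_lo hhalf_hi h0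
            (by rwa [if_neg (by omega)] at hrep),
          show ("+" : String) = String.ofList ['+'] from rfl, strCons]
      simp
    · rw [if_neg hi, if_neg hi,
          altGo_append (n / 2).toNat (i - n / 2) (n / 2) rfl ['*'],
          ih fuel (n / 2) (i - n / 2) (by omega) hhalf_lo hhalf_hi (by omega)
            (by rwa [if_pos (by omega)] at hrep),
          show ("*" : String) = String.ofList ['*'] from rfl, strCons]
      simp

-- ===== VERDICT (by name: the statement is the Claim_ definition above) =====
theorem operators_part1_spec : Claim_equal_operators_part1 := by
  intro indice n hdom hpre
  obtain ⟨h2, h0, hhi, hrep⟩ := hpre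
  have hn0 : n.toNat ≠ 0 := by omega
  have hlog1 : 1 ≤ n.toNat.log2 := (Nat.le_log2 hn0).mpr (by omega)
  have hjn : n.toNat.log2 - 1 + 1 = n.toNat.log2 := by omega
  have hlo_nat : 2 ^ (n.toNat.log2 - 1 + 1) ≤ n.toNat := by
    rw [hjn]; exact Nat.log2_self_le hn0
  have hlo : (2:Int) ^ (n.toNat.log2 - 1 + 1) ≤ n := by
    calc (2:Int) ^ (n.toNat.log2 - 1 + 1) = ((2 ^ (n.toNat.log2 - 1 + 1) : Nat) : Int) := by
          push_cast; ring
      _ ≤ (n.toNat : Int) := by exact_mod_cast hlo_nat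
      _ = n := Int.toNat_of_nonneg (by omega)
  have hdom' : n ≤ 2147483648 := by
    unfold Dom_operators_part1 pvDomInt at hdom
    simp only [Bool.and_eq_true, decide_eq_true_eq] at hdom
    exact hdom.2.2
  have hfuel : n.toNat.log2 - 1 + 1 ≤ 64 := by
    have : n.toNat.log2 < 32 := (Nat.log2_lt hn0).mpr (by omega)
    omega
  exact main_eq (n.toNat.log2 - 1) 64 n indice hfuel hlo hhi h0 hrep
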